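-- pv_equiv track=rewrite | github.com/jng34/LeetCode | 2279-maximum-bags-with-full-capacity-of-rocks/2279-maximum-bags-with-full-capacity-of-rocks.py | maximumBags
-- ===== SOURCE A (Python) =====
-- from typing import List
--
-- def maximumBags(capacity: List[int], rocks: List[int], additionalRocks: int) -> int:
--   rocks_needed = [0]*len(rocks)
--   for i in range(len(rocks)):
--     rocks_needed[i] = capacity[i]-rocks[i]
--   rocks_needed.sort()
--
--   max_bags = 0
--
--   for r in range(len(rocks_needed)):
--     if rocks_needed[r] == 0:
--       max_bags += 1
--     elif additionalRocks >= rocks_needed[r]: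
--       additionalRocks -= rocks_needed[r]
--       rocks_needed[r] = 0
--       max_bags += 1
--
--   return max_bags
-- ===== SOURCE B (Python) =====
-- from typing import List
--
-- def maximumBags(capacity: List[int], rocks: List[int], additionalRocks: int) -> int:
--   # Selection-based greedy: no sort. Zero-deficit bags are counted upfront;
--   # then repeatedly extract the cheapest remaining nonzero deficit by a min
--   # scan while it fits the budget, stopping at the first unaffordable minimum.
--   deficits = [c - r for c, r in zip(capacity, rocks)]
--   count = deficits.count(0)
--   remaining = [d for d in deficits if d != 0]
--   budget = additionalRocks
--   while remaining:
--     d = min(remaining)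
--     if budget < d:
--       break
--     budget -= d
--     remaining.remove(d)
--     count += 1
--   return count
-- ===== Notes on version B (the rewrite author's own statement) =====
-- stated objective: alternative
-- what changed: A sorts the deficit list and scans it once, interleaving budget subtraction and counting; B never sorts: it counts zero deficits upfront and then runs a selection-style loop that repeatedly extracts the minimum remaining nonzero deficit (min scan + remove) while it fits the budget, breaking at the first unaffordable minimum.
import Mathlib
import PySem

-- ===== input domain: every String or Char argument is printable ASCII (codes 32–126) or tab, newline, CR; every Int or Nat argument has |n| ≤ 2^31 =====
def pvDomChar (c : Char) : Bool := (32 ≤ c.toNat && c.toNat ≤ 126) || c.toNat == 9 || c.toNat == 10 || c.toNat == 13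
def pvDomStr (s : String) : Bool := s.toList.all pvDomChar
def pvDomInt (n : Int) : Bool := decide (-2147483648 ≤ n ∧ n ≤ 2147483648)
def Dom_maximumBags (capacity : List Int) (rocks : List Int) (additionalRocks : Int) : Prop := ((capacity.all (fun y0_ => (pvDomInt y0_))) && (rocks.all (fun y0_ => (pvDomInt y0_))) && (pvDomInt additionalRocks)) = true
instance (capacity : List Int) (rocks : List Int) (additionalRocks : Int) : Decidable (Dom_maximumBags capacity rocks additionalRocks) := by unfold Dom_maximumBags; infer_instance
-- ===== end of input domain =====

-- B replaces A's sort-then-scan greedy by a selection-based greedy: zeros counted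
-- upfront, then repeated min-extraction of the remaining nonzero deficits while
-- affordable (no sort); alternative decomposition, not claimed faster.
-- ===== PORT A =====
def maximumBags (capacity : List Int) (rocks : List Int) (additionalRocks : Int) : Int :=
  let rocks_needed := (PySem.List.pyRange 0 (rocks.length : Int) 1).map
      (fun i => PySem.List.pyGetD capacity i 0 - PySem.List.pyGetD rocks i 0)
  let sortedNeeded := PySem.List.sorted rocks_needed (fun x => x) false
  let st := (PySem.List.pyRange 0 (sortedNeeded.length : Int) 1).foldl
      (fun (st : Int × Int) r =>
        let d := PySem.List.pyGetD sortedNeeded r 0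
        if d = 0 then (st.1, st.2 + 1)
        else if st.1 ≥ d then (st.1 - d, st.2 + 1)
        else st)
      (additionalRocks, 0)
  st.2

-- ===== PORT B =====
-- B's `while remaining` loop: extract min, break if unaffordable, remove it, count.
def pvSelGreedy (budget : Int) (remaining : List Int) : Int :=
  match _hm : PySem.List.min? remaining (fun x => x) with
  | none => 0            -- remaining is empty: loop ends
  | some d =>
    if budget < d then 0 -- break
    else
      match hr : PySem.List.remove? remaining d with
      | none => 0        -- unreachable: d ∈ remaining
      | some rest => 1 + pvSelGreedy (budget - d) rest
termination_by remaining.length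
decreasing_by
  have hmem : d ∈ remaining := by
    by_contra h
    rw [(PySem.List.remove?_eq_none_iff remaining d).mpr h] at hr
    cases hr
  have h2 := PySem.List.remove?_eq_some_erase (xs := remaining) (v := d) hmem
  rw [h2] at hr
  cases hr
  have hl := List.length_erase_of_mem hmem
  have hne : remaining ≠ [] := by rintro rfl; cases hmem
  have hpos : 0 < remaining.length := List.length_pos_iff.mpr hne
  omega

def maximumBags_alt (capacity : List Int) (rocks : List Int) (additionalRocks : Int) : Int :=
  let deficits := (capacity.zip rocks).map (fun p => p.1 - p.2)
  let count : Int := (PySem.List.count deficits 0 : Int)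
  let remaining := deficits.filter (fun d => d ≠ 0)
  count + pvSelGreedy additionalRocks remaining

-- ===== PRECONDITION & SPEC =====
-- A indexes capacity[i] for every i < len(rocks): it raises IndexError when rocks is longer.
def Pre_maximumBags (capacity : List Int) (rocks : List Int) (additionalRocks : Int) : Prop :=
  rocks.length ≤ capacity.length
instance (capacity : List Int) (rocks : List Int) (additionalRocks : Int) : Decidable (Pre_maximumBags capacity rocks additionalRocks) := by unfold Pre_maximumBags; infer_instance

def pvWitness_maximumBags : List Int × List Int × Int := ([5, 3, 4], [2, 3, 1], 4)

def Spec_maximumBags (capacity : List Int) (rocks : List Int) (additionalRocks : Int) (out : Int) : Prop := out = maximumBags_alt capacity rocks additionalRocks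
instance (capacity : List Int) (rocks : List Int) (additionalRocks : Int) (out : Int) : Decidable (Spec_maximumBags capacity rocks additionalRocks out) := by unfold Spec_maximumBags; infer_instance

-- ===== CLAIM (what is proved, stated in full; the proofs are below) =====
def Claim_equal_maximumBags : Prop := ∀ (capacity : List Int) (rocks : List Int) (additionalRocks : Int), Dom_maximumBags capacity rocks additionalRocks → Pre_maximumBags capacity rocks additionalRocks → Spec_maximumBags capacity rocks additionalRocks (maximumBags capacity rocks additionalRocks)

-- ===== LEMMAS AND PROOFS =====

-- greedy cut-off over an already-sorted list (characterises both sides)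
def pvStop (b : Int) : List Int → Int
  | [] => 0
  | d :: t => if b ≥ d then 1 + pvStop (b - d) t else 0

lemma pvStop_nonmem (b : Int) (t : List Int) (h : ∀ x ∈ t, ¬ b ≥ x) : pvStop b t = 0 := by
  cases t with
  | nil => rfl
  | cons d t => simp [pvStop, h d (by simp)]

-- selection greedy equals the sorted-scan greedy on any permutation of a sorted list
lemma pvSelGreedy_eq_pvStop (s : List Int) (hs : s.Pairwise (· ≤ ·)) :
    ∀ (l : List Int) (b : Int), l.Perm s → pvSelGreedy b l = pvStop b s := by
  induction s with
  | nil =>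
    intro l b hp
    rw [List.perm_nil.mp hp]
    rw [pvSelGreedy.eq_def]
    rfl
  | cons h t ih =>
    intro l b hp
    rcases List.pairwise_cons.mp hs with ⟨hhd, ht⟩
    have hhl : h ∈ l := hp.mem_iff.mpr (by simp)
    -- min? l = some h
    obtain ⟨d, hd⟩ : ∃ d, PySem.List.min? l (fun x => x) = some d := by
      cases hml : PySem.List.min? l (fun x => x) with
      | none =>
        exact absurd ((PySem.List.min?_eq_none_iff l _).mp hml ▸ hhl) (List.not_mem_nil)
      | some d => exact ⟨d, rfl⟩
    have hdl : d ∈ l := PySem.List.min?_mem hd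
    have hdh : d = h := by
      have h1 : d ≤ h := PySem.List.min?_isMin hd h hhl
      have h2 : h ≤ d := by
        have : d ∈ h :: t := hp.mem_iff.mp hdl
        rcases List.mem_cons.mp this with e | e
        · omega
        · exact hhd d e
      omega
    subst hdh
    have hrem : PySem.List.remove? l d = some (l.erase d) :=
      PySem.List.remove?_eq_some_erase (xs := l) (v := d) hdl
    have hperm : (l.erase d).Perm t := by
      have := hp.erase d
      simpa using this
    rw [pvSelGreedy.eq_def]
    split
    · next hm' => rw [hm'] at hd; cases hd
    · next d' hm' =>
      rw [hm'] at hd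
      injection hd with hdd
      subst hdd
      by_cases hb : b < d'
      · simp [pvStop, hb, show ¬ b ≥ d' by omega]
      · simp only [if_neg hb]
        split
        · next hr' => rw [hr'] at hrem; cases hrem
        · next rest hr' =>
          rw [hr'] at hrem
          injection hrem with hre
          subst hre
          rw [ih ht (l.erase d') (b - d') hperm]
          simp [pvStop, show b ≥ d' by omega]

-- main loop invariant: on a sorted list, A's interleaved fold equals
-- (zeros always counted) + greedy cut-off over the nonzero elements
lemma pvMain (s : List Int) (b c : Int) (hs : s.Pairwise (· ≤ ·)) :
    (s.foldl (fun (st : Int × Int) d =>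
        if d = 0 then (st.1, st.2 + 1)
        else if st.1 ≥ d then (st.1 - d, st.2 + 1)
        else st) (b, c)).2
      = c + (s.count 0 : Int) + pvStop b (s.filter (fun d => d ≠ 0)) := by
  induction s generalizing b c with
  | nil => simp [pvStop]
  | cons d t ih =>
    rcases List.pairwise_cons.mp hs with ⟨hd, ht⟩
    by_cases h0 : d = 0
    · subst h0
      simp only [List.foldl_cons]
      rw [ih _ _ ht]
      simp
      ring
    · by_cases hb : b ≥ d
      · simp only [List.foldl_cons, if_neg h0, if_pos hb]
        rw [ih _ _ ht]
        simp [h0, pvStop, hb]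
        ring
      · simp only [List.foldl_cons, if_neg h0, if_neg hb]
        rw [ih _ _ ht]
        have hz : pvStop b (t.filter (fun d => !decide (d = 0))) = 0 := by
          apply pvStop_nonmem
          intro x hx
          have hmem := List.mem_of_mem_filter hx
          have := hd x hmem
          omega
        simp [h0, pvStop, hb, hz]

-- under Pre_, A's comprehension-by-index equals B's zip-map
lemma pvDeficits_eq (capacity rocks : List Int) (h : rocks.length ≤ capacity.length) :
    (PySem.List.pyRange 0 (rocks.length : Int) 1).map
        (fun i => PySem.List.pyGetD capacity i 0 - PySem.List.pyGetD rocks i 0)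
      = (capacity.zip rocks).map (fun p => p.1 - p.2) := by
  apply List.ext_getElem
  · simp [PySem.List.length_pyRange_one, Nat.min_eq_right h]
  · intro k h1 h2
    have hk : k < rocks.length := by
      simpa [PySem.List.length_pyRange_one] using h1
    have hk' : k < capacity.length := lt_of_lt_of_le hk h
    rw [List.getElem_map, PySem.List.getElem_pyRange_one]
    rw [List.getElem_map, List.getElem_zip]
    have e1 : PySem.List.pyGetD capacity ((0 : Int) + (k : Int)) 0 = capacity[k] := by
      rw [zero_add, PySem.List.pyGetD_natCast]
      exact List.getD_eq_getElem _ _ hk'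
    have e2 : PySem.List.pyGetD rocks ((0 : Int) + (k : Int)) 0 = rocks[k] := by
      rw [zero_add, PySem.List.pyGetD_natCast]
      exact List.getD_eq_getElem _ _ hk
    rw [e1, e2]

-- ===== VERDICT (by name: the statement is the Claim_ definition above) =====
theorem maximumBags_spec : Claim_equal_maximumBags := by
  intro capacity rocks additionalRocks _ hpre
  unfold Spec_maximumBags maximumBags maximumBags_alt
  dsimp only
  rw [pvDeficits_eq capacity rocks hpre]
  set dfs := (capacity.zip rocks).map (fun p => p.1 - p.2) with hdfs
  set s := PySem.List.sorted dfs (fun x => x) false with hs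
  have hsp : s.Perm dfs := by simpa using PySem.List.sorted_perm dfs (fun x => x) false
  have hsorted : s.Pairwise (· ≤ ·) := by
    simpa using PySem.List.sorted_pairwise dfs (fun x => x)
  rw [PySem.List.foldl_pyRange_zero_pyGetD' s 0
    (fun (st : Int × Int) d =>
      if d = 0 then (st.1, st.2 + 1)
      else if st.1 ≥ d then (st.1 - d, st.2 + 1)
      else st) (additionalRocks, 0)]
  rw [pvMain s additionalRocks 0 hsorted]
  have hcnt : s.count 0 = dfs.count 0 := hsp.count_eq 0
  have hfp : (dfs.filter (fun d => d ≠ 0)).Perm (s.filter (fun d => d ≠ 0)) :=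
    (hsp.filter _).symm
  have hfs : (s.filter (fun d => d ≠ 0)).Pairwise (· ≤ ·) := hsorted.filter _
  rw [pvSelGreedy_eq_pvStop (s.filter (fun d => d ≠ 0)) hfs
      (dfs.filter (fun d => d ≠ 0)) additionalRocks hfp]
  rw [hcnt, PySem.List.count_eq]
  ring
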